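-- pv_equiv track=rewrite | github.com/elp2/advent_of_code | 20.part2.py | gridify
-- ===== SOURCE A (Python) =====
-- def gridify(positioned):
--     xes = []
--     yes = []
--     for x, y in positioned.keys():
--         xes.append(x)
--         yes.append(y)
--
--     grid = []
--     for y in range(min(yes), max(yes) + 1):
--         row = []
--         for x in range(min(xes), max(xes) + 1):
--             if (x, y) in positioned:
--                 row.append(positioned[(x, y)])
--             else:
--                 row.append("????")
--         grid.append(row)
--     return grid
-- ===== SOURCE B (Python) =====
-- def gridify(positioned):
--     xs = [x for x, y in positioned]
--     ys = [y for x, y in positioned]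
--     minx, maxx = min(xs), max(xs)
--     miny, maxy = min(ys), max(ys)
--     grid = [["????" for _ in range(maxx - minx + 1)]
--             for _ in range(maxy - miny + 1)]
--     for (x, y), v in positioned.items():
--         grid[y - miny][x - minx] = v
--     return grid
-- ===== Notes on version B (the rewrite author's own statement) =====
-- stated objective: alternative
-- what changed: A scans every (x,y) cell of the bounding box and does a dict membership test plus lookup per cell; B pre-fills the whole grid with "????" rows and then makes a single pass over the dict's items, scattering each value into grid[y-miny][x-minx], so the sparse data is traversed once with no per-cell branch.
import Mathlib
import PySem

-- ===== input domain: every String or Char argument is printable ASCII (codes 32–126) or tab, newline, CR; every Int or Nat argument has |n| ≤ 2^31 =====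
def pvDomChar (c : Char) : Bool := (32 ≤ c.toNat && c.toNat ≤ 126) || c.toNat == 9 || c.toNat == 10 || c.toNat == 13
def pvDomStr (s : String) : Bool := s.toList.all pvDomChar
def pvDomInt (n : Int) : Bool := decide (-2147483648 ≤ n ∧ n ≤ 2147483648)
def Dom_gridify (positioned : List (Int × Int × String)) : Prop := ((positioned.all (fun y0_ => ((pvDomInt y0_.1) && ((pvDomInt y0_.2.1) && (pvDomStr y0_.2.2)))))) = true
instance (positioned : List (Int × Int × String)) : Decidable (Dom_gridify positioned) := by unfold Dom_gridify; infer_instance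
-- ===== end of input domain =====

-- B pre-fills the whole grid with "????" and scatters the dict's values into it in one pass over
-- the dict (no per-cell membership test), instead of A's per-cell lookup scan; return value only —
-- neither version mutates its argument.

-- ===== PORT A =====
-- In each port the dict parameter (given as its (key, value) pairs in insertion order) is first
-- rebuilt as a PySem.Dict (last value wins on duplicate keys, as in Python).

def gridify (positioned : List (Int × Int × String)) : List (List String) :=
  let d := PySem.Dict.ofList (positioned.map (fun t => ((t.1, t.2.1), t.2.2)))
  let xes := d.keys.foldl (fun acc k => acc ++ [k.1]) []
  let yes := d.keys.foldl (fun acc k => acc ++ [k.2]) []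
  match PySem.List.min? yes id, PySem.List.max? yes id,
        PySem.List.min? xes id, PySem.List.max? xes id with
  | some miny, some maxy, some minx, some maxx =>
      (PySem.List.pyRange miny (maxy + 1)).foldl (fun grid y =>
        grid ++ [(PySem.List.pyRange minx (maxx + 1)).foldl (fun row x =>
          row ++ [if d.contains (x, y) then d.getD (x, y) "????" else "????"]) []]) []
  | _, _, _, _ => []   -- unreachable under Pre_gridify (Python: min([]) raises ValueError)

-- ===== PORT B =====
def gridify_alt (positioned : List (Int × Int × String)) : List (List String) :=
  let d := PySem.Dict.ofList (positioned.map (fun t => ((t.1, t.2.1), t.2.2)))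
  let xs := d.keys.map (fun k => k.1)
  let ys := d.keys.map (fun k => k.2)
  match PySem.List.min? xs id with
  | none => []   -- unreachable under Pre_gridify (Python: min([]) raises ValueError)
  | some minx =>
    match PySem.List.max? xs id with
    | none => []
    | some maxx =>
      match PySem.List.min? ys id with
      | none => []
      | some miny =>
        match PySem.List.max? ys id with
        | none => []
        | some maxy =>
          let grid := (List.range (maxy - miny + 1).toNat).map
            (fun _ => (List.range (maxx - minx + 1).toNat).map (fun _ => "????"))
          d.items.foldl (fun g kv =>
            PySem.List.pySetD g (kv.1.2 - miny)
              (PySem.List.pySetD (PySem.List.pyGetD g (kv.1.2 - miny) []) (kv.1.1 - minx) kv.2)) grid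

-- ===== PRECONDITION & SPEC =====
-- Pre_ excludes only the empty dict, on which Python's min([]) raises ValueError in both A and B.
def Pre_gridify (positioned : List (Int × Int × String)) : Prop := positioned ≠ []
instance (positioned : List (Int × Int × String)) : Decidable (Pre_gridify positioned) := by unfold Pre_gridify; infer_instance
def pvWitness_gridify : (List (Int × Int × String)) := [(0, 0, "ab"), (2, 1, "cd")]

def Spec_gridify (positioned : List (Int × Int × String)) (out : List (List String)) : Prop := out = gridify_alt positioned
instance (positioned : List (Int × Int × String)) (out : List (List String)) : Decidable (Spec_gridify positioned out) := by unfold Spec_gridify; infer_instance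

-- ===== CLAIM (what is proved, stated in full; the proofs are below) =====
def Claim_equal_gridify : Prop := ∀ (positioned : List (Int × Int × String)), Dom_gridify positioned → Pre_gridify positioned → Spec_gridify positioned (gridify positioned)

-- ===== LEMMAS AND PROOFS =====

-- the keys of the rebuilt dict are the listed keys, as a set in first-insertion order
theorem mkDict_keys (positioned : List (Int × Int × String)) :
    (PySem.Dict.ofList (positioned.map (fun t => ((t.1, t.2.1), t.2.2)))).keys
      = PySem.Set.ofList (positioned.map (fun t => (t.1, t.2.1))) := by
  have h := PySem.Dict.keys_foldl_insert_key (positioned.map (fun t => ((t.1, t.2.1), t.2.2)))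
      (fun p : (Int × Int) × String => p.1) (fun _ p => p.2)
      (PySem.Dict.empty : PySem.Dict (Int × Int) String)
  simp only [List.map_map] at h
  show (List.foldl (fun acc p => acc.insert p.1 p.2) PySem.Dict.empty
          (positioned.map (fun t => ((t.1, t.2.1), t.2.2)))).keys = _
  rw [show (fun acc (p : (Int × Int) × String) => acc.insert p.1 p.2)
        = (fun (d : PySem.Dict (Int × Int) String) (x : (Int × Int) × String) =>
            d.insert x.1 ((fun (_ : PySem.Dict (Int × Int) String) (p : (Int × Int) × String) => p.2) d x))
      from rfl, h]
  rw [show (PySem.Dict.empty : PySem.Dict (Int × Int) String).keys = [] from rfl,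
      PySem.Set.update_nil_left]
  rfl

-- a last-match fold over an assoc list with no matching key keeps its seed
theorem foldl_if_no_key (k : Int × Int) (d0 : String) :
    ∀ (l : List ((Int × Int) × String)), (∀ kv ∈ l, kv.1 ≠ k) →
      l.foldl (fun acc kv => if kv.1 = k then kv.2 else acc) d0 = d0 := by
  intro l
  induction l generalizing d0 with
  | nil => intro _; rfl
  | cons hd tl ih =>
      intro h
      simp only [List.foldl_cons, if_neg (h hd (by simp))]
      exact ih d0 (fun kv hm => h kv (by simp [hm]))

-- over an assoc list with distinct keys the fold returns the value stored at k
theorem foldl_if_mem (k : Int × Int) (v d0 : String) :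
    ∀ (l : List ((Int × Int) × String)), (l.map (fun kv => kv.1)).Nodup → (k, v) ∈ l →
      l.foldl (fun acc kv => if kv.1 = k then kv.2 else acc) d0 = v := by
  intro l
  induction l generalizing d0 with
  | nil => intro _ h; cases h
  | cons hd tl ih =>
      intro hnd hm
      simp only [List.map_cons, List.nodup_cons] at hnd
      rcases List.mem_cons.mp hm with h | h
      · subst h
        simp only [List.foldl_cons, if_pos]
        refine foldl_if_no_key k v tl (fun kv hkv hk => hnd.1 ?_)
        rw [← hk]
        exact List.mem_map_of_mem (f := fun kv => kv.1) hkv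
      · have hne : hd.1 ≠ k := by
          intro he
          apply hnd.1
          rw [he]
          exact List.mem_map_of_mem (f := fun kv => kv.1) h
        simp only [List.foldl_cons, if_neg hne]
        exact ih d0 hnd.2 h

-- every cell of the pre-filled grid is "????"
theorem grid0_cell (H W : Nat) (r c : Nat) :
    ((((List.range H).map (fun _ => (List.range W).map (fun _ => "????"))).getD r []).getD c "????") = "????" := by
  simp only [List.getD_eq_getElem?_getD, List.map_const', List.length_range, List.getElem?_replicate]
  split_ifs with h
  · simp only [Option.getD_some, List.getElem?_replicate]
    split_ifs <;> rfl
  · rfl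

-- getD after an in-range set
theorem getD_set_of_lt {α : Type} (g : List α) (n : Nat) (x : α) (d : α) (r : Nat) (h : n < g.length) :
    (g.set n x).getD r d = if r = n then x else g.getD r d := by
  by_cases hr : r = n
  · subst hr
    rw [if_pos rfl, List.getD_eq_getElem _ _ (by rw [List.length_set]; exact h), List.getElem_set_self]
  · rw [if_neg hr, List.getD_eq_getElem?_getD, List.getElem?_set_ne (fun he => hr he.symm),
        ← List.getD_eq_getElem?_getD]

-- the scatter loop: shape is preserved and each cell holds the last value written to it
theorem scatter_spec (minx miny : Int) (W : Nat) :
    ∀ (l : List ((Int × Int) × String)) (g : List (List String)),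
      (∀ row ∈ g, row.length = W) →
      (∀ kv ∈ l, minx ≤ kv.1.1 ∧ kv.1.1 - minx < (W : Int) ∧
                 miny ≤ kv.1.2 ∧ kv.1.2 - miny < (g.length : Int)) →
      (l.foldl (fun g kv =>
          PySem.List.pySetD g (kv.1.2 - miny)
            (PySem.List.pySetD (PySem.List.pyGetD g (kv.1.2 - miny) []) (kv.1.1 - minx) kv.2)) g).length
          = g.length ∧
      (∀ row ∈ l.foldl (fun g kv =>
          PySem.List.pySetD g (kv.1.2 - miny)
            (PySem.List.pySetD (PySem.List.pyGetD g (kv.1.2 - miny) []) (kv.1.1 - minx) kv.2)) g, row.length = W) ∧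
      (∀ (r c : Nat),
        ((l.foldl (fun g kv =>
            PySem.List.pySetD g (kv.1.2 - miny)
              (PySem.List.pySetD (PySem.List.pyGetD g (kv.1.2 - miny) []) (kv.1.1 - minx) kv.2)) g).getD r []).getD c "????"
          = l.foldl (fun acc kv => if kv.1 = (minx + (c : Int), miny + (r : Int)) then kv.2 else acc)
              ((g.getD r []).getD c "????")) := by
  intro l
  induction l with
  | nil => intro g hrows _; exact ⟨rfl, hrows, fun r c => rfl⟩
  | cons kv l ih =>
      intro g hrows hb
      obtain ⟨h1, h2, h3, h4⟩ := hb kv (List.mem_cons_self ..)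
      have hri : (0:Int) ≤ kv.1.2 - miny := by omega
      have hci : (0:Int) ≤ kv.1.1 - minx := by omega
      have hrl : (kv.1.2 - miny).toNat < g.length := by omega
      have hstep : PySem.List.pySetD g (kv.1.2 - miny)
            (PySem.List.pySetD (PySem.List.pyGetD g (kv.1.2 - miny) []) (kv.1.1 - minx) kv.2)
          = g.set (kv.1.2 - miny).toNat ((g[(kv.1.2 - miny).toNat]'hrl).set (kv.1.1 - minx).toNat kv.2) := by
        rw [PySem.List.pySetD_of_nonneg _ _ hri, PySem.List.pySetD_of_nonneg _ _ hci,
            PySem.List.pyGetD_eq_getElem _ _ hri (by exact_mod_cast h4)]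
      set n := (kv.1.2 - miny).toNat with hn
      set m := (kv.1.1 - minx).toNat with hm
      have hWrow : (g[n]'hrl).length = W := hrows _ (List.getElem_mem hrl)
      have hmW : m < W := by omega
      set g1 := g.set n ((g[n]'hrl).set m kv.2) with hg1
      have hrows1 : ∀ row ∈ g1, row.length = W := by
        intro row hrow
        rcases List.mem_or_eq_of_mem_set hrow with h | h
        · exact hrows row h
        · rw [h, List.length_set]; exact hWrow
      have hlen1 : g1.length = g.length := List.length_set
      obtain ⟨ihl, ihr, ihc⟩ := ih g1 hrows1 (by
        intro p hp
        obtain ⟨a1, a2, a3, a4⟩ := hb p (List.mem_cons_of_mem _ hp)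
        exact ⟨a1, a2, a3, by rw [hlen1]; exact a4⟩)
      refine ⟨?_, ?_, ?_⟩
      · simp only [List.foldl_cons, hstep, ihl, hlen1]
      · intro row hrow
        apply ihr
        simpa only [List.foldl_cons, hstep] using hrow
      · intro r c
        simp only [List.foldl_cons, hstep]
        rw [ihc r c]
        congr 1
        have hiff : kv.1 = (minx + (c : Int), miny + (r : Int)) ↔ (r = n ∧ c = m) := by
          simp only [Prod.ext_iff]
          omega
        rw [hg1, getD_set_of_lt _ _ _ _ _ hrl]
        by_cases hrn : r = n
        · rw [if_pos hrn, getD_set_of_lt _ _ _ _ _ (by rw [hWrow]; exact hmW)]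
          by_cases hcm : c = m
          · rw [if_pos hcm, if_pos (hiff.mpr ⟨hrn, hcm⟩)]
          · rw [if_neg hcm, if_neg (fun h => hcm (hiff.mp h).2), hrn,
                List.getD_eq_getElem _ _ hrl]
        · rw [if_neg hrn, if_neg (fun h => hrn (hiff.mp h).1)]

-- ===== VERDICT (by name: the statement is the Claim_ definition above) =====
theorem gridify_spec : Claim_equal_gridify := by
  intro positioned _ hpre
  unfold Spec_gridify
  have hknd : (PySem.Dict.ofList (positioned.map (fun t => ((t.1, t.2.1), t.2.2)))).keys.Nodup := PySem.Dict.nodup_keys_ofList _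
  have hkne : (PySem.Dict.ofList (positioned.map (fun t => ((t.1, t.2.1), t.2.2)))).keys ≠ [] := by
    rw [mkDict_keys]
    cases positioned with
    | nil => exact absurd rfl hpre
    | cons t ts => simp [PySem.Set.ofList_cons]
  obtain ⟨minx, hx⟩ : ∃ m, PySem.List.min? ((PySem.Dict.ofList (positioned.map (fun t => ((t.1, t.2.1), t.2.2)))).keys.map (fun k => k.1)) id = some m := by
    cases h : PySem.List.min? ((PySem.Dict.ofList (positioned.map (fun t => ((t.1, t.2.1), t.2.2)))).keys.map (fun k => k.1)) id with
    | none => exact absurd (List.map_eq_nil_iff.mp ((PySem.List.min?_eq_none_iff _ _).mp h)) hkne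
    | some m => exact ⟨m, rfl⟩
  obtain ⟨maxx, hX⟩ : ∃ m, PySem.List.max? ((PySem.Dict.ofList (positioned.map (fun t => ((t.1, t.2.1), t.2.2)))).keys.map (fun k => k.1)) id = some m := by
    cases h : PySem.List.max? ((PySem.Dict.ofList (positioned.map (fun t => ((t.1, t.2.1), t.2.2)))).keys.map (fun k => k.1)) id with
    | none => exact absurd (List.map_eq_nil_iff.mp ((PySem.List.max?_eq_none_iff _ _).mp h)) hkne
    | some m => exact ⟨m, rfl⟩
  obtain ⟨miny, hy⟩ : ∃ m, PySem.List.min? ((PySem.Dict.ofList (positioned.map (fun t => ((t.1, t.2.1), t.2.2)))).keys.map (fun k => k.2)) id = some m := by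
    cases h : PySem.List.min? ((PySem.Dict.ofList (positioned.map (fun t => ((t.1, t.2.1), t.2.2)))).keys.map (fun k => k.2)) id with
    | none => exact absurd (List.map_eq_nil_iff.mp ((PySem.List.min?_eq_none_iff _ _).mp h)) hkne
    | some m => exact ⟨m, rfl⟩
  obtain ⟨maxy, hY⟩ : ∃ m, PySem.List.max? ((PySem.Dict.ofList (positioned.map (fun t => ((t.1, t.2.1), t.2.2)))).keys.map (fun k => k.2)) id = some m := by
    cases h : PySem.List.max? ((PySem.Dict.ofList (positioned.map (fun t => ((t.1, t.2.1), t.2.2)))).keys.map (fun k => k.2)) id with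
    | none => exact absurd (List.map_eq_nil_iff.mp ((PySem.List.max?_eq_none_iff _ _).mp h)) hkne
    | some m => exact ⟨m, rfl⟩
  show gridify positioned = gridify_alt positioned
  unfold gridify gridify_alt
  simp only [PySem.List.foldl_append_singleton_eq_map, List.nil_append, hx, hX, hy, hY]
  -- bounds on every stored key
  have hbnd : ∀ kv ∈ (PySem.Dict.ofList (positioned.map (fun t => ((t.1, t.2.1), t.2.2)))).items,
      minx ≤ kv.1.1 ∧ kv.1.1 - minx < (((maxx - minx + 1).toNat : Nat) : Int) ∧
      miny ≤ kv.1.2 ∧ kv.1.2 - miny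
        < ((((List.range (maxy - miny + 1).toNat).map
              (fun _ => (List.range (maxx - minx + 1).toNat).map (fun _ => "????"))).length : Nat) : Int) := by
    intro kv hkv
    have hk : kv.1 ∈ (PySem.Dict.ofList (positioned.map (fun t => ((t.1, t.2.1), t.2.2)))).keys := PySem.Dict.mem_keys_of_mem_items _ hkv
    have hx1 : minx ≤ kv.1.1 := PySem.List.min?_isMin hx _ (List.mem_map_of_mem hk)
    have hx2 : kv.1.1 ≤ maxx := PySem.List.max?_isMax hX _ (List.mem_map_of_mem hk)
    have hy1 : miny ≤ kv.1.2 := PySem.List.min?_isMin hy _ (List.mem_map_of_mem hk)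
    have hy2 : kv.1.2 ≤ maxy := PySem.List.max?_isMax hY _ (List.mem_map_of_mem hk)
    refine ⟨hx1, by omega, hy1, ?_⟩
    simp only [List.length_map, List.length_range]
    omega
  have hrows0 : ∀ row ∈ (List.range (maxy - miny + 1).toNat).map
      (fun _ => (List.range (maxx - minx + 1).toNat).map (fun _ => "????")),
      row.length = (maxx - minx + 1).toNat := by
    intro row hrow
    obtain ⟨_, _, hr⟩ := List.mem_map.mp hrow
    rw [← hr]
    simp
  obtain ⟨hlen, hwid, hcell⟩ := scatter_spec minx miny ((maxx - minx + 1).toNat)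
      (PySem.Dict.ofList (positioned.map (fun t => ((t.1, t.2.1), t.2.2)))).items _ hrows0 hbnd
  apply List.ext_getElem
  · simp only [List.length_map, PySem.List.length_pyRange_one, hlen, List.length_range]
    omega
  · intro r h1 h2
    rw [List.getElem_map, PySem.List.getElem_pyRange_one, ← List.getD_eq_getElem _ [] h2]
    have hrow : (List.foldl (fun g kv =>
          PySem.List.pySetD g (kv.1.2 - miny)
            (PySem.List.pySetD (PySem.List.pyGetD g (kv.1.2 - miny) []) (kv.1.1 - minx) kv.2))
          ((List.range (maxy - miny + 1).toNat).map
            (fun _ => (List.range (maxx - minx + 1).toNat).map (fun _ => "????")))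
          (PySem.Dict.ofList (positioned.map (fun t => ((t.1, t.2.1), t.2.2)))).items).getD r []
        = (List.foldl (fun g kv =>
          PySem.List.pySetD g (kv.1.2 - miny)
            (PySem.List.pySetD (PySem.List.pyGetD g (kv.1.2 - miny) []) (kv.1.1 - minx) kv.2))
          ((List.range (maxy - miny + 1).toNat).map
            (fun _ => (List.range (maxx - minx + 1).toNat).map (fun _ => "????")))
          (PySem.Dict.ofList (positioned.map (fun t => ((t.1, t.2.1), t.2.2)))).items)[r]'h2 := List.getD_eq_getElem _ _ h2
    apply List.ext_getElem
    · rw [List.length_map, PySem.List.length_pyRange_one, hrow,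
          hwid _ (List.getElem_mem h2)]
      omega
    · intro c hc1 hc2
      rw [List.getElem_map, PySem.List.getElem_pyRange_one,
          ← List.getD_eq_getElem _ "????" hc2, hcell r c, grid0_cell]
      by_cases hcont : (PySem.Dict.ofList (positioned.map (fun t => ((t.1, t.2.1), t.2.2)))).contains (minx + (c : Int), miny + (r : Int)) = true
      · rw [if_pos hcont]
        have hk : (minx + (c : Int), miny + (r : Int)) ∈ (PySem.Dict.ofList (positioned.map (fun t => ((t.1, t.2.1), t.2.2)))).keys :=
          (PySem.Dict.contains_iff_mem_keys _ _).mp hcont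
        obtain ⟨kv, hkv, hkeq⟩ := List.mem_map.mp
          (hk : (minx + (c : Int), miny + (r : Int)) ∈ (PySem.Dict.ofList (positioned.map (fun t => ((t.1, t.2.1), t.2.2)))).items.map (fun p => p.1))
        have hmem : ((minx + (c : Int), miny + (r : Int)), kv.2) ∈ (PySem.Dict.ofList (positioned.map (fun t => ((t.1, t.2.1), t.2.2)))).items := by
          rw [← hkeq]
          exact hkv
        rw [foldl_if_mem _ kv.2 _ _ hknd hmem]
        exact PySem.Dict.getD_of_mem_items _ hmem hknd _
      · rw [if_neg hcont]
        refine (foldl_if_no_key _ _ _ (fun kv hkv hk => ?_)).symm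
        exact hcont ((PySem.Dict.contains_iff_mem_keys _ _).mpr
          (hk ▸ PySem.Dict.mem_keys_of_mem_items _ hkv))
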